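-- pv_equiv track=rewrite | github.com/nihathalici/The-Python-Workbook | CHPT-08-Recursion/Exer-176.py | phonetic_spelling
-- ===== SOURCE A (Python) =====
-- def phonetic_spelling(s):
--     """
--     :param s: a word or a sentence (string)
--     :return: a string which represents a series of words that do the spelling for the passed string
--     """
--     spelling = ''
--
--     d = {'A': 'Alpha', 'B': 'Bravo', 'C': 'Charlie', 'D': 'Delta', 'E': 'Echo',\
--          'F': 'Foxtrot', 'G': 'Golf', 'H': 'Hotel', 'I': 'India', 'J': 'Juliet',\
--          'K': 'Kilo', 'L': 'Lima', 'M': 'Mike', 'N': 'November', 'O': 'Oscar',\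
--          'P': 'Papa', 'Q': 'Quebec', 'R': 'Romeo', 'S': 'Sierra', 'T': 'Tango',\
--          'U': 'Uniform', 'V': 'Victor', 'W': 'Whiskey', 'X': 'Xray', 'Y': 'Yankee',\
--          'Z': 'Zulu'}
--
--     # BASE CASE
--     # when the passed string has become empty, the spelling is done
--     if s == '':
--         return ''
--
--     # RECURSIVE CASE
--     # at each recursion, the program checks if the element is inside the dictionary
--     # if so, the spelling variable gets new content
--     element = s[0].upper()
--     if element in d:
--         spelling += d[element]
--
--     # each recursion takes the previous spelling content and invoke
--     # the function again from the following element
--     return spelling + phonetic_spelling(s[1:])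
-- ===== SOURCE B (Python) =====
-- NATO = ['Alpha', 'Bravo', 'Charlie', 'Delta', 'Echo', 'Foxtrot', 'Golf',
--         'Hotel', 'India', 'Juliet', 'Kilo', 'Lima', 'Mike', 'November',
--         'Oscar', 'Papa', 'Quebec', 'Romeo', 'Sierra', 'Tango', 'Uniform',
--         'Victor', 'Whiskey', 'Xray', 'Yankee', 'Zulu']
--
--
-- def phonetic_spelling(s):
--     parts = []
--     for c in s:
--         k = ord(c)
--         if 65 <= k <= 90:
--             parts.append(NATO[k - 65])
--         elif 97 <= k <= 122:
--             parts.append(NATO[k - 97])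
--     return ''.join(parts)
-- ===== Notes on version B (the rewrite author's own statement) =====
-- stated objective: faster
-- what changed: Replaces A's recursion that rebuilds the dictionary and copies a string slice at every call by an explicit accumulator loop that indexes a 26-word array via character-code arithmetic (ord ranges A-Z / a-z) and joins the parts once at the end.
import Mathlib
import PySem

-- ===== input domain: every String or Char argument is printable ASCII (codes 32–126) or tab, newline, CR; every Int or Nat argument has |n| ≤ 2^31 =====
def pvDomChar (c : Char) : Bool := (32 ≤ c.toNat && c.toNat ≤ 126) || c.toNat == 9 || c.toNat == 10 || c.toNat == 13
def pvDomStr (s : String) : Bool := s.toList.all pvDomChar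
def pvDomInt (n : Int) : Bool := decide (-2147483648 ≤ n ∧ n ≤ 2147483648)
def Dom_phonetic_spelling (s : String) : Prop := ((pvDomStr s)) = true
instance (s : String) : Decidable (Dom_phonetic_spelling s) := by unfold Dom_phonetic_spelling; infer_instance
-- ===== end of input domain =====

-- B replaces A's dictionary-driven recursion-with-slicing by an explicit accumulator loop that
-- indexes a 26-word array by character-code arithmetic (ord ranges A–Z / a–z), then joins once.
-- Return-value equivalence only; strings are ported through List Char (PySem convention).

-- ===== PORT A =====
-- the NATO dictionary A rebuilds on every call (a constant table)
def natoDict : PySem.Dict Char String := PySem.Dict.ofList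
  [('A', "Alpha"), ('B', "Bravo"), ('C', "Charlie"), ('D', "Delta"), ('E', "Echo"),
   ('F', "Foxtrot"), ('G', "Golf"), ('H', "Hotel"), ('I', "India"), ('J', "Juliet"),
   ('K', "Kilo"), ('L', "Lima"), ('M', "Mike"), ('N', "November"), ('O', "Oscar"),
   ('P', "Papa"), ('Q', "Quebec"), ('R', "Romeo"), ('S', "Sierra"), ('T', "Tango"),
   ('U', "Uniform"), ('V', "Victor"), ('W', "Whiskey"), ('X', "Xray"), ('Y', "Yankee"),
   ('Z', "Zulu")]

-- A's recursion: base case s == '', else element = s[0].upper(); spelling += d[element] if present;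
-- return spelling + phonetic_spelling(s[1:])   (s[1:] is the tail of the char list)
def phoneticGoA : List Char → List Char
  | [] => []
  | c :: rest =>
    let element := PySem.Chars.upperChar c
    let spelling : List Char :=
      if natoDict.contains element then [] ++ (natoDict.getD element "").toList else []
    spelling ++ phoneticGoA rest

def phonetic_spelling (s : String) : String := String.ofList (phoneticGoA s.toList)

-- ===== PORT B =====
-- B's 26-word array, indexed by ord(c) - 65 (upper) / ord(c) - 97 (lower)
def natoWords : List String :=
  ["Alpha", "Bravo", "Charlie", "Delta", "Echo", "Foxtrot", "Golf",
   "Hotel", "India", "Juliet", "Kilo", "Lima", "Mike", "November",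
   "Oscar", "Papa", "Quebec", "Romeo", "Sierra", "Tango", "Uniform",
   "Victor", "Whiskey", "Xray", "Yankee", "Zulu"]

-- Source B's loop: parts accumulator, per character k = ord(c), range tests, list indexing
-- (the guarded NATO[k-65]/NATO[k-97] is always in range, ported as getD)
def phoneticLoopB (parts : List String) : List Char → List String
  | [] => parts
  | c :: rest =>
    let k := c.toNat
    if 65 ≤ k ∧ k ≤ 90 then phoneticLoopB (parts ++ [natoWords.getD (k - 65) ""]) rest
    else if 97 ≤ k ∧ k ≤ 122 then phoneticLoopB (parts ++ [natoWords.getD (k - 97) ""]) rest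
    else phoneticLoopB parts rest

def phonetic_spelling_alt (s : String) : String :=
  PySem.Str.join "" (phoneticLoopB [] s.toList)

-- ===== PRECONDITION & SPEC =====
def Spec_phonetic_spelling (s : String) (out : String) : Prop := out = phonetic_spelling_alt s
instance (s : String) (out : String) : Decidable (Spec_phonetic_spelling s out) := by unfold Spec_phonetic_spelling; infer_instance

-- ===== CLAIM (what is proved, stated in full; the proofs are below) =====
def Claim_equal_phonetic_spelling : Prop := ∀ (s : String), Dom_phonetic_spelling s → Spec_phonetic_spelling s (phonetic_spelling s)

-- ===== LEMMAS AND PROOFS =====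
-- the per-character word B's loop emits (proof-side characterisation of one loop step)
def natoOf (c : Char) : Option String :=
  if 65 ≤ c.toNat ∧ c.toNat ≤ 90 then some (natoWords.getD (c.toNat - 65) "")
  else if 97 ≤ c.toNat ∧ c.toNat ≤ 122 then some (natoWords.getD (c.toNat - 97) "")
  else none

theorem loopB_eq_filterMap (l : List Char) : ∀ parts,
    phoneticLoopB parts l = parts ++ l.filterMap natoOf := by
  induction l with
  | nil => simp [phoneticLoopB]
  | cons c rest ih =>
    intro parts
    by_cases h1 : 65 ≤ c.toNat ∧ c.toNat ≤ 90
    · simp [phoneticLoopB, natoOf, h1, ih]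
    · by_cases h2 : 97 ≤ c.toNat ∧ c.toNat ≤ 122
      · simp [phoneticLoopB, natoOf, h1, h2, ih]
      · simp [phoneticLoopB, natoOf, h1, h2, ih]

-- per-character agreement of A's dict step with B's arithmetic step, on ASCII codes < 127
set_option maxRecDepth 4000 in
theorem step_agree_nat : ∀ n ∈ List.range 127,
    (if natoDict.contains (PySem.Chars.upperChar (Char.ofNat n))
       then (natoDict.getD (PySem.Chars.upperChar (Char.ofNat n)) "").toList else [])
    = ((natoOf (Char.ofNat n)).map String.toList).getD [] := by decide

theorem step_agree (c : Char) (h : pvDomChar c = true) :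
    (if natoDict.contains (PySem.Chars.upperChar c)
       then (natoDict.getD (PySem.Chars.upperChar c) "").toList else [])
    = ((natoOf c).map String.toList).getD [] := by
  have hlt : c.toNat < 127 := by
    simp [pvDomChar] at h
    omega
  have := step_agree_nat c.toNat (by simpa using hlt)
  simpa [Char.ofNat_toNat] using this

theorem goA_eq_flatten (l : List Char) (h : ∀ c ∈ l, pvDomChar c = true) :
    phoneticGoA l = ((l.filterMap natoOf).map String.toList).flatten := by
  induction l with
  | nil => simp [phoneticGoA]
  | cons c rest ih =>
    have hc := step_agree c (h c (by simp))
    have hr := ih (fun x hx => h x (by simp [hx]))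
    cases hg : natoOf c with
    | none =>
      simp [phoneticGoA, hr, hg]
      simpa [hg] using hc
    | some w =>
      simp [phoneticGoA, hr, hg]
      simpa [hg] using hc

theorem intercalate_nil_sep (xs : List (List Char)) :
    List.intercalate ([] : List Char) xs = xs.flatten := by
  induction xs with
  | nil => simp [List.intercalate]
  | cons x xs ih => cases xs <;> simp_all [List.intercalate, List.intersperse]

-- ===== VERDICT (by name: the statement is the Claim_ definition above) =====
theorem phonetic_spelling_spec : Claim_equal_phonetic_spelling := by
  intro s hdom
  unfold Spec_phonetic_spelling phonetic_spelling phonetic_spelling_alt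
  rw [loopB_eq_filterMap]
  have hall : ∀ c ∈ s.toList, pvDomChar c = true := by
    simpa [Dom_phonetic_spelling, pvDomStr, List.all_eq_true] using hdom
  rw [goA_eq_flatten s.toList hall]
  apply String.toList_injective
  simp [PySem.Str.toList_join, PySem.Chars.join, intercalate_nil_sep]
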